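-- pv_equiv track=rewrite | github.com/dumpcoder/Developer1-Programming-Challenge | main.py | createHistogramAndGetJustification
-- ===== SOURCE A (Python) =====
-- def createHistogramAndGetJustification(words):
--     histogram = {}
--     # JustLength equals to the max word length in words
--     justLength = 0
--     for word in words:
--         if word in histogram:
--             histogram[word] += 1
--         else:
--             histogram[word] = 1
--             wordLength = len(word)
--             if wordLength > justLength:
--                 justLength = wordLength
--
--     # Sorts histogram by value, and returns a list of key/value tuples.
--     histogram = sorted(histogram.items(), key=lambda x: x[1], reverse=True)
--
--     return (histogram, justLength)
-- ===== SOURCE B (Python) =====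
-- def createHistogramAndGetJustification(words):
--     # Alternative: one get-based counting pass, then a grouping "sort" that
--     # concatenates, for each distinct count in descending order, the items
--     # carrying that count (stability is by construction).
--     histogram = {}
--     for word in words:
--         histogram[word] = histogram.get(word, 0) + 1
--     justLength = max(map(len, histogram), default=0)
--     items = list(histogram.items())
--     counts = sorted(set(histogram.values()), reverse=True)
--     result = [p for c in counts for p in items if p[1] == c]
--     return (result, justLength)
-- ===== Notes on version B (the rewrite author's own statement) =====
-- stated objective: alternative
-- what changed: Counting uses dict.get with a post-pass max for the justification length instead of the in-loop membership test and running max, and the comparison sort is replaced by grouping: distinct counts are sorted descending and the item list is concatenated bucket by bucket.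
import Mathlib
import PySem

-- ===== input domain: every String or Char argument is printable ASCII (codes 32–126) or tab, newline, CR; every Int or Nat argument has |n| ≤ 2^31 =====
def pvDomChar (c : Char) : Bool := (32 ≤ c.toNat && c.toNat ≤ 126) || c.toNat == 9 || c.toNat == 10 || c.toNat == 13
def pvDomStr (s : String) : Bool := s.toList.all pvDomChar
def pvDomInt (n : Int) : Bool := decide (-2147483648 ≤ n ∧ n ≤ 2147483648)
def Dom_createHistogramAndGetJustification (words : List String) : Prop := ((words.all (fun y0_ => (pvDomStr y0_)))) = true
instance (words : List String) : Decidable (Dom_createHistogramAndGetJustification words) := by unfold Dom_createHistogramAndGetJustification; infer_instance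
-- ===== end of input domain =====

-- B replaces A's membership-test counting loop and library sort by get-based counting,
-- a post-pass max over the keys, and a descending group-by-count concatenation (alternative, not claimed faster).

-- ===== PORT A =====
def createHistogramAndGetJustification (words : List String) : (List (String × Int)) × Int :=
  let st := words.foldl (fun (p : PySem.Dict String Int × Int) word =>
      if p.1.contains word then
        (p.1.insert word (p.1.getD word 0 + 1), p.2)
      else
        let wordLength := PySem.Str.len word
        (p.1.insert word 1, if wordLength > p.2 then wordLength else p.2))
    (PySem.Dict.mk [], 0)
  (PySem.List.sorted st.1.items (fun x => x.2) true, st.2)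

-- ===== PORT B =====
def createHistogramAndGetJustification_alt (words : List String) : (List (String × Int)) × Int :=
  let hist := words.foldl (fun d word => d.insert word (d.getD word 0 + 1)) (PySem.Dict.mk [])
  -- max(map(len, histogram), default=0): lengths are nonnegative, so the running max from 0 is exact
  let justLength := (hist.keys.map PySem.Str.len).foldl max 0
  let items := hist.items
  let counts := PySem.List.sorted (PySem.Set.ofList hist.values) (fun c : Int => c) true
  (counts.flatMap (fun c => items.filter (fun p => p.2 == c)), justLength)

-- ===== PRECONDITION & SPEC =====
def Spec_createHistogramAndGetJustification (words : List String) (out : (List (String × Int)) × Int) : Prop := out = createHistogramAndGetJustification_alt words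
instance (words : List String) (out : (List (String × Int)) × Int) : Decidable (Spec_createHistogramAndGetJustification words out) := by unfold Spec_createHistogramAndGetJustification; infer_instance

-- ===== CLAIM (what is proved, stated in full; the proofs are below) =====
def Claim_equal_createHistogramAndGetJustification : Prop := ∀ (words : List String), Dom_createHistogramAndGetJustification words → Spec_createHistogramAndGetJustification words (createHistogramAndGetJustification words)

-- ===== LEMMAS AND PROOFS =====

-- A's counting loop equals B's counting loop paired with the running max of key lengths.
lemma foldA_eq (words : List String) (d : PySem.Dict String Int) :
    words.foldl (fun (p : PySem.Dict String Int × Int) word =>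
      if p.1.contains word then
        (p.1.insert word (p.1.getD word 0 + 1), p.2)
      else
        let wordLength := PySem.Str.len word
        (p.1.insert word 1, if wordLength > p.2 then wordLength else p.2))
      (d, (d.keys.map PySem.Str.len).foldl max 0)
    = (words.foldl (fun d word => d.insert word (d.getD word 0 + 1)) d,
       (((words.foldl (fun d word => d.insert word (d.getD word 0 + 1)) d).keys.map PySem.Str.len)).foldl max 0) := by
  induction words generalizing d with
  | nil => rfl
  | cons w ws ih =>
    simp only [List.foldl_cons]
    by_cases hc : d.contains w
    · have hk : (d.insert w (d.getD w 0 + 1)).keys = d.keys :=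
        PySem.Dict.keys_insert_of_contains _ _ hc
      simpa [hc, hk] using ih (d.insert w (d.getD w 0 + 1))
    · have h0 : d.getD w 0 = 0 := PySem.Dict.getD_of_not_contains _ _ (by simpa using hc)
      have hk : (d.insert w 1).keys = d.keys ++ [w] :=
        PySem.Dict.keys_insert_of_not_contains _ _ (by simpa using hc)
      have hmax : (if PySem.Str.len w > (d.keys.map PySem.Str.len).foldl max 0
                   then PySem.Str.len w else (d.keys.map PySem.Str.len).foldl max 0)
          = (((d.insert w 1).keys.map PySem.Str.len)).foldl max 0 := by
        rw [hk]
        simp only [List.map_append, List.foldl_append, List.map_cons, List.map_nil,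
          List.foldl_cons, List.foldl_nil]
        rcases lt_or_ge ((d.keys.map PySem.Str.len).foldl max 0) (PySem.Str.len w) with h | h
        · rw [if_pos h, max_eq_right h.le]
        · rw [if_neg (not_lt.mpr h), max_eq_left h]
      simp only [hc, h0, zero_add, hmax]
      exact ih (d.insert w 1)

lemma insertBy_append_not {α : Type} (p : α → α → Bool) (x : α) (l t : List α)
    (h : ∀ y ∈ l, p x y = false) :
    PySem.List.insertBy p x (l ++ t) = l ++ PySem.List.insertBy p x t := by
  induction l with
  | nil => simp
  | cons a l ih =>
    have ha : p x a = false := h a (by simp)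
    cases t with
    | nil =>
      simp only [List.cons_append, PySem.List.insertBy, ha]
      simpa using ih (fun y hy => h y (by simp [hy]))
    | cons b t' =>
      simp only [List.cons_append, PySem.List.insertBy, ha]
      simpa [PySem.List.insertBy] using ih (fun y hy => h y (by simp [hy]))

lemma insertBy_all {α : Type} (p : α → α → Bool) (x : α) (t : List α)
    (h : ∀ y ∈ t, p x y = true) :
    PySem.List.insertBy p x t = x :: t := by
  cases t with
  | nil => rfl
  | cons a t' => simp [PySem.List.insertBy, h a (by simp)]

lemma flatMap_congr_mem {α β : Type} (cs : List α) (f g : α → List β)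
    (h : ∀ c ∈ cs, f c = g c) : cs.flatMap f = cs.flatMap g := by
  induction cs with
  | nil => rfl
  | cons a l ih => simp [List.flatMap_cons, h a (by simp), ih (fun c hc => h c (by simp [hc]))]

-- inserting x into a descending bucket concatenation appends it at the end of its bucket
lemma insert_buckets {α : Type} (key : α → Int) (x : α) (cs : List Int)
    (hcs : cs.Pairwise (· > ·)) (hmem : key x ∈ cs) (f : Int → List α)
    (hf : ∀ c, ∀ y ∈ f c, key y = c) :
    PySem.List.insertBy (fun a b => decide (key b < key a)) x (cs.flatMap f)
      = cs.flatMap (fun c => f c ++ if key x = c then [x] else []) := by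
  induction cs with
  | nil => simp at hmem
  | cons c cs' ih =>
    have hgt : ∀ c' ∈ cs', c > c' := (List.pairwise_cons.mp hcs).1
    by_cases hx : key x = c
    · have hskip : ∀ y ∈ f c, (fun a b => decide (key b < key a)) x y = false := by
        intro y hy
        simp [hf c y hy, hx]
      have hall : ∀ y ∈ cs'.flatMap f, (fun a b => decide (key b < key a)) x y = true := by
        intro y hy
        rcases List.mem_flatMap.mp hy with ⟨c', hc', hyc'⟩
        simp [hf c' y hyc', hx]
        exact hgt c' hc'
      rw [List.flatMap_cons, insertBy_append_not _ _ _ _ hskip, insertBy_all _ _ _ hall]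
      rw [List.flatMap_cons, if_pos hx]
      have : cs'.flatMap (fun c' => f c' ++ if key x = c' then [x] else []) = cs'.flatMap f := by
        refine flatMap_congr_mem _ _ _ (fun c' hc' => ?_)
        rw [if_neg, List.append_nil]
        have := hgt c' hc'
        omega
      rw [this]
      simp
    · have hmem' : key x ∈ cs' := by
        rcases List.mem_cons.mp hmem with h | h
        · exact absurd h hx
        · exact h
      have hxlt : key x < c := by
        have := hgt _ hmem'
        omega
      have hskip : ∀ y ∈ f c, (fun a b => decide (key b < key a)) x y = false := by
        intro y hy
        simp [hf c y hy]
        omega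
      rw [List.flatMap_cons, insertBy_append_not _ _ _ _ hskip,
        ih ((List.pairwise_cons.mp hcs).2) hmem']
      rw [List.flatMap_cons, if_neg hx, List.append_nil]

-- the stable reverse sort by an Int key is the descending bucket concatenation
lemma sorted_rev_eq_flatMap {α : Type} (key : α → Int) (xs : List α) (cs : List Int)
    (hcs : cs.Pairwise (· > ·)) (hx : ∀ x ∈ xs, key x ∈ cs) :
    PySem.List.sorted xs key true = cs.flatMap (fun c => xs.filter (fun x => key x == c)) := by
  induction xs using List.reverseRecOn with
  | nil =>
    rw [PySem.List.sorted_rev_eq_foldl_insertBy]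
    simp
  | append_singleton ys x ih =>
    rw [PySem.List.sorted_rev_eq_foldl_insertBy, List.foldl_append, List.foldl_cons, List.foldl_nil,
      ← PySem.List.sorted_rev_eq_foldl_insertBy,
      ih (fun y hy => hx y (by simp [hy]))]
    rw [insert_buckets key x cs hcs (hx x (by simp))
      (fun c => ys.filter (fun y => key y == c))
      (fun c y hy => by simpa using (List.mem_filter.mp hy).2)]
    refine flatMap_congr_mem _ _ _ (fun c hc => ?_)
    rw [List.filter_append]
    by_cases h : key x = c <;> simp [h]

lemma sorted_items_eq (D : PySem.Dict String Int) :
    PySem.List.sorted D.items (fun x => x.2) true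
      = (PySem.List.sorted (PySem.Set.ofList D.values) (fun c : Int => c) true).flatMap
          (fun c => D.items.filter (fun p => p.2 == c)) := by
  have hnd : (PySem.List.sorted (PySem.Set.ofList D.values) (fun c : Int => c) true).Nodup :=
    (PySem.List.sorted_perm (PySem.Set.ofList D.values) (fun c : Int => c) true).symm.nodup
      (PySem.Set.nodup_ofList _)
  have hge := PySem.List.sorted_pairwise_rev (PySem.Set.ofList D.values) (fun c : Int => c)
  have hcs : (PySem.List.sorted (PySem.Set.ofList D.values) (fun c : Int => c) true).Pairwise (· > ·) := by
    have := hnd.and hge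
    exact this.imp (fun ⟨hne, hle⟩ => lt_of_le_of_ne hle (Ne.symm hne))
  have hx : ∀ p ∈ D.items, (p.2 : Int) ∈
      PySem.List.sorted (PySem.Set.ofList D.values) (fun c : Int => c) true := by
    intro p hp
    rw [PySem.List.mem_sorted, PySem.Set.mem_ofList]
    exact List.mem_map_of_mem hp
  exact sorted_rev_eq_flatMap (fun p => p.2) D.items _ hcs hx

-- ===== VERDICT (by name: the statement is the Claim_ definition above) =====
theorem createHistogramAndGetJustification_spec : Claim_equal_createHistogramAndGetJustification := by
  intro words _
  unfold Spec_createHistogramAndGetJustification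
  unfold createHistogramAndGetJustification createHistogramAndGetJustification_alt
  have h := foldA_eq words (PySem.Dict.mk [])
  simp only [PySem.Dict.keys_mk, List.map_nil, List.foldl_nil] at h
  rw [h]
  dsimp only
  rw [sorted_items_eq]
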